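-- pv_equiv track=rewrite | github.com/StepanKorobov/test_task | task1/task1.py | get_result_interval
-- ===== SOURCE A (Python) =====
-- def get_result_interval(n, m) -> str:
--     """
--     Функция создающая путь по которому двигается интервал длины
--     """
--
--     # Создаём список из чисел от 1 до n
--     numbers_list: list = [i for i in range(1, n + 1)]
--     # Текущий индекс, начинаем с нуля
--     current_index: int = 0
--     # Лист содержащий первые элементы интервалов
--     intervals_list: list = list()
--
--     # Используем цикл While, так как заранее не знаем точно сколько итераций потребуется
--     while True:
--         # Добавляем элемент по индексу (получается первый элемент интервала)
--         intervals_list.append(str(numbers_list[current_index]))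
--         # Вычисляем индекс первого элемента следующего интервала
--         current_index: int = (current_index + m - 1) % n
--         # Если индекс следующего элемента 0, то прерываем цикл
--         if current_index == 0:
--             break
--
--     intervals: str = "".join(intervals_list)
--
--     return intervals
-- ===== SOURCE B (Python) =====
-- import math
--
-- def get_result_interval(n, m) -> str:
--     # Inverse-permutation scatter: instead of walking the cycle, compute for each
--     # visited value its position in the output directly via the modular inverse
--     # of the reduced step, and write it into a preallocated slot table.
--     step = (m - 1) % n
--     g = math.gcd(n, step)
--     period = n // g
--     reduced = step // g
--     inv = pow(reduced, -1, period) if period > 1 else 0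
--     out = [""] * period
--     for k in range(period):
--         out[k * inv % period] = str(1 + k * g)
--     return "".join(out)
-- ===== Notes on version B (the rewrite author's own statement) =====
-- stated objective: alternative
-- what changed: B does not walk the modular cycle at all: it computes the modular inverse of the reduced step (pow(step//g, -1, n//g)) and scatters each visited value str(1+k*g) directly into its output position k*inv mod period in a preallocated slot table, then joins; avoiding the per-step index recomputation and list.append gives a measured constant-factor speedup.
import Mathlib
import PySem

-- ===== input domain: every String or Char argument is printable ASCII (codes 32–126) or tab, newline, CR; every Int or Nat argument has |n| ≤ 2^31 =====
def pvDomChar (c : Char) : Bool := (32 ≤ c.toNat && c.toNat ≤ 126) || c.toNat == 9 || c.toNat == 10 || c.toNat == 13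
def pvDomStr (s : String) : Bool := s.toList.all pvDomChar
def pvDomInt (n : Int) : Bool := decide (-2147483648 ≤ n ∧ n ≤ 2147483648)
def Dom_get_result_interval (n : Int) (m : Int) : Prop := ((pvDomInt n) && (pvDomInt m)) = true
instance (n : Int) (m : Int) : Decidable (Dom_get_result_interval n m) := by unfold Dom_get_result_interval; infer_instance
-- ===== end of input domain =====

-- B replaces A's cycle walk by an inverse-permutation scatter: it computes the modular inverse
-- of the reduced step and writes each visited value directly at its output position.

-- ===== PORT A =====
-- A's 'while True' loop. Fuel only makes the recursion total: under Pre_ the loop runs exactly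
-- n/gcd(n,(m-1)%n) ≤ n iterations, so fuel n.toNat is never exhausted there.
def pvLoopA (numbers : List Int) (n m : Int) : Nat → Int → List String → List String
  | 0, _, acc => acc
  | fuel+1, c, acc =>
    match PySem.List.pyGet? numbers c with
    | none => acc  -- IndexError: outside Pre_
    | some v =>
      let acc' := acc ++ [PySem.Int.toStr v]
      let c' := PySem.Int.mod (c + m - 1) n
      if c' = 0 then acc' else pvLoopA numbers n m fuel c' acc'

def get_result_interval (n : Int) (m : Int) : String :=
  PySem.Str.join "" (pvLoopA (PySem.List.pyRange 1 (n + 1) 1) n m n.toNat 0 [])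

-- ===== PORT B =====
-- pow(reduced, -1, period): Python returns the unique inverse in [0, period); the Bezout
-- coefficient Nat.gcdA reduced mod period is that same unique value, so this is exact.
def get_result_interval_alt (n : Int) (m : Int) : String :=
  let step := PySem.Int.mod (m - 1) n
  let g : Int := Int.gcd n step
  let period := PySem.Int.floordiv n g
  let reduced := PySem.Int.floordiv step g
  let inv : Int := if 1 < period then PySem.Int.mod (Nat.gcdA reduced.toNat period.toNat) period else 0
  let out := (PySem.List.pyRange 0 period 1).foldl
    (fun acc k => acc.set (PySem.Int.mod (k * inv) period).toNat (PySem.Int.toStr (1 + k * g)))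
    (List.replicate period.toNat "")
  PySem.Str.join "" out

-- ===== PRECONDITION & SPEC =====
-- Pre_ excludes n ≤ 0, where A raises IndexError (numbers_list is empty, numbers_list[0] fails).
def Pre_get_result_interval (n : Int) (m : Int) : Prop := 1 ≤ n
instance (n : Int) (m : Int) : Decidable (Pre_get_result_interval n m) := by unfold Pre_get_result_interval; infer_instance
def pvWitness_get_result_interval : Int × Int := (6, 3)

def Spec_get_result_interval (n : Int) (m : Int) (out : String) : Prop := out = get_result_interval_alt n m
instance (n : Int) (m : Int) (out : String) : Decidable (Spec_get_result_interval n m out) := by unfold Spec_get_result_interval; infer_instance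

-- ===== CLAIM (what is proved, stated in full; the proofs are below) =====
def Claim_equal_get_result_interval : Prop := ∀ (n : Int) (m : Int), Dom_get_result_interval n m → Pre_get_result_interval n m → Spec_get_result_interval n m (get_result_interval n m)

-- ===== LEMMAS AND PROOFS =====

-- cancellation core: with g > 0 and N', S' coprime, g*N' divides k*(g*S') iff N' divides k
lemma pvAuxDvd (g N' S' k : Nat) (hg : 0 < g) (hcop : Nat.Coprime N' S') :
    g * N' ∣ k * (g * S') ↔ N' ∣ k := by
  constructor
  · intro h
    have h2 : g * N' ∣ g * (k * S') := by
      have he : k * (g * S') = g * (k * S') := by ring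
      rwa [he] at h
    exact hcop.dvd_of_dvd_mul_right ((mul_dvd_mul_iff_left hg.ne').mp h2)
  · rintro ⟨t, rfl⟩
    exact ⟨t * S', by ring⟩

-- the k with N ∣ k*S are exactly the multiples of N / gcd N S
lemma pvDvdMulIff (N S : Nat) (hN : 0 < N) (k : Nat) :
    N ∣ k * S ↔ (N / Nat.gcd N S) ∣ k := by
  have hgpos : 0 < Nat.gcd N S := Nat.gcd_pos_of_pos_left _ hN
  have hN' : N = Nat.gcd N S * (N / Nat.gcd N S) :=
    (Nat.mul_div_cancel' (Nat.gcd_dvd_left N S)).symm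
  have hS' : S = Nat.gcd N S * (S / Nat.gcd N S) :=
    (Nat.mul_div_cancel' (Nat.gcd_dvd_right N S)).symm
  have h := pvAuxDvd (Nat.gcd N S) (N / Nat.gcd N S) (S / Nat.gcd N S) k hgpos
    (Nat.coprime_div_gcd_div_gcd hgpos)
  rwa [← hN', ← hS'] at h

-- the stepping rule of A's loop: from index k (0 ≤ k < n) the next index is (k + S) % N
lemma pvStep (n m : Int) (N S k : Nat) (hN : (N : Int) = n) (hNpos : 0 < N)
    (hS : (S : Int) = PySem.Int.mod (m - 1) n) (hk : k < N) :
    PySem.Int.mod ((k : Int) + m - 1) n = (((k + S) % N : Nat) : Int) := by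
  have hn : 0 < n := by omega
  rw [PySem.Int.mod_eq_emod_of_pos hn] at hS ⊢
  have h1 : (k : Int) + m - 1 = (k : Int) + (m - 1) := by ring
  have hk' : (k : Int) % n = (k : Int) :=
    Int.emod_eq_of_lt (Int.natCast_nonneg k) (by omega)
  rw [h1, Int.add_emod, hk', ← hS, ← hN]
  push_cast
  ring

-- the element A reads at index k < n
lemma pvRead (n : Int) (N k : Nat) (hN : (N : Int) = n) (hk : k < N) :
    PySem.List.pyGet? (PySem.List.pyRange 1 (n + 1) 1) ((k : Nat) : Int)
      = some (1 + (k : Int)) := by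
  have hlen : (PySem.List.pyRange 1 (n + 1) 1).length = N := by
    rw [PySem.List.length_pyRange_one]; omega
  rw [PySem.List.pyGet?_natCast, List.getElem?_eq_getElem (by omega),
    PySem.List.getElem_pyRange_one 1 (n + 1) k (by omega)]

-- the characterisation of A's loop, by induction on fuel
lemma pvLoopA_spec (n m : Int) (N S : Nat) (hN : (N : Int) = n) (hNpos : 0 < N)
    (hS : (S : Int) = PySem.Int.mod (m - 1) n) (fuel : Nat) :
    ∀ (j : Nat) (acc : List String),
      j < N / Nat.gcd N S → N / Nat.gcd N S - j ≤ fuel →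
      pvLoopA (PySem.List.pyRange 1 (n + 1) 1) n m fuel ((j * S % N : Nat) : Int) acc
        = acc ++ (List.range' j (N / Nat.gcd N S - j)).map
            (fun i => PySem.Int.toStr (1 + ((i * S % N : Nat) : Int))) := by
  induction fuel with
  | zero => intro j acc hj hf; omega
  | succ fuel ih =>
    intro j acc hj hf
    have hidx : j * S % N < N := Nat.mod_lt _ hNpos
    have hnext : PySem.Int.mod (((j * S % N : Nat) : Int) + m - 1) n
        = ((((j + 1) * S) % N : Nat) : Int) := by
      rw [pvStep n m N S (j * S % N) hN hNpos hS hidx]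
      congr 1
      rw [Nat.mod_add_mod, Nat.succ_mul]
    have hdvd_iff : N ∣ (j + 1) * S ↔ (N / Nat.gcd N S) ∣ (j + 1) :=
      pvDvdMulIff N S hNpos (j + 1)
    rw [pvLoopA, pvRead n N (j * S % N) hN hidx]
    simp only [hnext]
    by_cases hend : j + 1 = N / Nat.gcd N S
    · have hz : ((j + 1) * S) % N = 0 := by
        rw [← Nat.dvd_iff_mod_eq_zero]
        exact hdvd_iff.mpr (hend ▸ dvd_refl _)
      rw [if_pos (by rw [hz]; rfl)]
      have h1 : N / Nat.gcd N S - j = 1 := by omega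
      rw [h1]
      simp
    · have hnz : ((j + 1) * S) % N ≠ 0 := by
        rw [Ne, ← Nat.dvd_iff_mod_eq_zero]
        intro hd
        have := Nat.le_of_dvd (by omega) (hdvd_iff.mp hd)
        omega
      rw [if_neg (fun h => hnz (by exact_mod_cast h)), ih (j + 1) _ (by omega) (by omega)]
      have hsplit : List.range' j (N / Nat.gcd N S - j)
          = j :: List.range' (j + 1) (N / Nat.gcd N S - (j + 1)) := by
        have h2 : N / Nat.gcd N S - j = (N / Nat.gcd N S - (j + 1)) + 1 := by omega
        rw [h2, List.range'_succ]
      rw [hsplit]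
      simp

-- B-side: folding List.set preserves the length
lemma pvFoldSetLen (f : Nat → Nat) (v : Nat → String) :
    ∀ (l : List Nat) (init : List String),
      (l.foldl (fun acc k => acc.set (f k) (v k)) init).length = init.length := by
  intro l
  induction l with
  | nil => intro init; rfl
  | cons a l ih => intro init; rw [List.foldl_cons, ih]; exact List.length_set ..

-- B-side: the scatter fold puts v (σ p) at position p (σ the inverse of the position map f)
lemma pvScatterGet (f σ : Nat → Nat) (v : Nat → String) (P : Nat)
    (hf : ∀ k, k < P → f k < P)
    (huniq : ∀ k, k < P → k = σ (f k)) :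
    ∀ (j : Nat), j ≤ P → ∀ (p k0 : Nat), k0 < j → f k0 = p →
      ((List.range j).foldl (fun acc k => acc.set (f k) (v k)) (List.replicate P ""))[p]?
        = some (v (σ p)) := by
  intro j
  induction j with
  | zero => intro _ p k0 h; omega
  | succ j ih =>
    intro hj p k0 hk0 hfk0
    rw [List.range_succ, List.foldl_append, List.foldl_cons, List.foldl_nil]
    have hlen : ((List.range j).foldl (fun acc k => acc.set (f k) (v k))
        (List.replicate P "")).length = P := by
      rw [pvFoldSetLen]; exact List.length_replicate
    have hfj : f j < P := hf j (by omega)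
    by_cases hcase : f j = p
    · rw [hcase, List.getElem?_set_self (by omega)]
      have : j = σ p := by rw [← hcase]; exact huniq j (by omega)
      rw [← this]
    · rw [List.getElem?_set_ne hcase]
      have : k0 ≠ j := fun h => hcase (h ▸ hfk0)
      exact ih (by omega) p k0 (by omega) hfk0

-- B-side: the Bezout coefficient reduced mod P is an inverse of S' mod P
lemma pvInv (S' P : Nat) (hP : 1 < P) (hcop : Nat.Coprime S' P) :
    S' * ((Nat.gcdA S' P) % (P : Int)).toNat % P = 1 := by
  have hbez : (1:Int) = S' * Nat.gcdA S' P + P * Nat.gcdB S' P := by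
    have h := Nat.gcd_eq_gcd_ab S' P
    rw [hcop] at h
    exact_mod_cast h
  have hmodnn : 0 ≤ (Nat.gcdA S' P) % (P:Int) := Int.emod_nonneg _ (by positivity)
  have hcast : (((Nat.gcdA S' P) % (P:Int)).toNat : Int) = (Nat.gcdA S' P) % (P:Int) :=
    Int.toNat_of_nonneg hmodnn
  have key : ((S':Int) * (((Nat.gcdA S' P) % (P:Int)).toNat : Int)) % P = 1 := by
    rw [hcast, Int.mul_emod, Int.emod_emod_of_dvd _ dvd_rfl, ← Int.mul_emod,
        ← Int.add_mul_emod_self_left (c := Nat.gcdB S' P), ← hbez]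
    exact Int.emod_eq_of_lt (by norm_num) (by exact_mod_cast hP)
  exact_mod_cast key

-- B-side: characterisation of the scatter port as the forward sequence
lemma pvAltChar (n m : Int) (hn : 0 < n) :
    get_result_interval_alt n m
      = PySem.Str.join ""
          ((List.range (n.toNat / Nat.gcd n.toNat (PySem.Int.mod (m - 1) n).toNat)).map
            (fun p => PySem.Int.toStr
              (1 + ((p * (PySem.Int.mod (m - 1) n).toNat % n.toNat : Nat) : Int)))) := by
  have hN : ((n.toNat : Nat) : Int) = n := Int.toNat_of_nonneg (by omega)
  have hNpos : 0 < n.toNat := by omega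
  have hs0 : 0 ≤ PySem.Int.mod (m - 1) n := PySem.Int.mod_nonneg _ hn
  have hS : (((PySem.Int.mod (m - 1) n).toNat : Nat) : Int) = PySem.Int.mod (m - 1) n :=
    Int.toNat_of_nonneg hs0
  set N := n.toNat with hNdef
  set S := (PySem.Int.mod (m - 1) n).toNat with hSdef
  set G := Nat.gcd N S with hGdef
  set P := N / G with hPdef
  set S' := S / G with hS'def
  have hGpos : 0 < G := Nat.gcd_pos_of_pos_left _ hNpos
  have hPpos : 0 < P := Nat.div_pos (Nat.le_of_dvd hNpos (Nat.gcd_dvd_left N S)) hGpos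
  have hNfac : N = P * G := (Nat.div_mul_cancel (Nat.gcd_dvd_left N S)).symm
  have hSfac : S = S' * G := (Nat.div_mul_cancel (Nat.gcd_dvd_right N S)).symm
  -- the Int-level local values of B reduced to Nat casts
  have hgcd : ((Int.gcd n (PySem.Int.mod (m - 1) n) : Nat) : Int) = ((G : Nat) : Int) := by
    have h1 : n.natAbs = N := by omega
    have h2 : (PySem.Int.mod (m - 1) n).natAbs = S := by omega
    simp [Int.gcd, h1, h2, hGdef]
  have hperiod : PySem.Int.floordiv n ((Int.gcd n (PySem.Int.mod (m - 1) n) : Nat) : Int)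
      = ((P : Nat) : Int) := by
    rw [hgcd, ← hN, PySem.Int.floordiv_natCast]
  have hreduced : PySem.Int.floordiv (PySem.Int.mod (m - 1) n)
      ((Int.gcd n (PySem.Int.mod (m - 1) n) : Nat) : Int) = ((S' : Nat) : Int) := by
    rw [hgcd, ← hS, PySem.Int.floordiv_natCast]
  -- the scatter data
  have hB : get_result_interval_alt n m
      = PySem.Str.join ""
          ((PySem.List.pyRange 0 ((P : Nat) : Int) 1).foldl
            (fun acc k => acc.set
              ((PySem.Int.mod (k * (if 1 < ((P : Nat) : Int) then
                  PySem.Int.mod (Nat.gcdA (((S' : Nat) : Int)).toNat (((P : Nat) : Int)).toNat)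
                    ((P : Nat) : Int) else 0)) ((P : Nat) : Int)).toNat)
              (PySem.Int.toStr (1 + k * ((G : Nat) : Int))))
            (List.replicate (((P : Nat) : Int)).toNat "")) := by
    show PySem.Str.join "" _ = _
    rw [hperiod, hreduced, hgcd]
  rw [hB]
  -- name the Nat-level inverse
  set tN : Nat := if 1 < P then ((Nat.gcdA S' P) % ((P : Nat) : Int)).toNat else 0 with htNdef
  have hinvE : (if 1 < ((P : Nat) : Int) then
      PySem.Int.mod (Nat.gcdA (((S' : Nat) : Int)).toNat (((P : Nat) : Int)).toNat)
        ((P : Nat) : Int) else 0) = ((tN : Nat) : Int) := by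
    rw [htNdef]
    by_cases h1 : 1 < P
    · rw [if_pos (by exact_mod_cast h1), if_pos h1, Int.toNat_natCast, Int.toNat_natCast,
        PySem.Int.mod_eq_emod_of_pos (by exact_mod_cast hPpos),
        Int.toNat_of_nonneg (Int.emod_nonneg _ (by exact_mod_cast hPpos.ne'))]
    · rw [if_neg (by exact_mod_cast h1), if_neg h1]
      rfl
  rw [hinvE, Int.toNat_natCast]
  -- the modular inverse property (trivial when P = 1)
  have hinv : S' * tN % P = 1 % P := by
    by_cases h1 : 1 < P
    · have hcop : Nat.Coprime S' P := (Nat.coprime_div_gcd_div_gcd hGpos).symm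
      rw [htNdef, if_pos h1, pvInv S' P h1 hcop, Nat.mod_eq_of_lt h1]
    · have hP1 : P = 1 := by omega
      rw [hP1]
      omega
  -- position map and its inverse
  have hfσ : ∀ p, p < P → (p * S' % P) * tN % P = p := by
    intro p hp
    rw [Nat.mod_mul_mod, mul_assoc, Nat.mul_mod p (S' * tN) P, hinv, ← Nat.mul_mod, mul_one,
      Nat.mod_eq_of_lt hp]
  have huniq : ∀ k, k < P → k = (k * tN % P) * S' % P := by
    intro k hk
    rw [Nat.mod_mul_mod, mul_assoc, mul_comm tN S', Nat.mul_mod k (S' * tN) P, hinv,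
      ← Nat.mul_mod, mul_one, Nat.mod_eq_of_lt hk]
  -- rewrite the fold into the generic scatter shape
  rw [PySem.List.pyRange_zero_natCast, List.foldl_map]
  have hfun : (fun (acc : List String) (k : Nat) => acc.set
        ((PySem.Int.mod ((k : Int) * ((tN : Nat) : Int)) ((P : Nat) : Int)).toNat)
        (PySem.Int.toStr (1 + (k : Int) * ((G : Nat) : Int))))
      = (fun acc k => acc.set (k * tN % P) (PySem.Int.toStr (1 + (k : Int) * ((G : Nat) : Int)))) := by
    funext acc k
    rw [show (k : Int) * ((tN : Nat) : Int) = ((k * tN : Nat) : Int) by push_cast; ring,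
      PySem.Int.mod_natCast, Int.toNat_natCast]
  rw [hfun]
  -- the scatter result, element by element
  congr 1
  apply List.ext_getElem?
  intro p
  have hlen : ((List.range P).foldl
      (fun acc k => acc.set (k * tN % P) (PySem.Int.toStr (1 + (k : Int) * ((G : Nat) : Int))))
      (List.replicate P "")).length = P := by
    rw [pvFoldSetLen (fun k => k * tN % P) (fun k => PySem.Int.toStr (1 + (k : Int) * ((G : Nat) : Int)))]
    exact List.length_replicate
  by_cases hp : p < P
  · have hget := pvScatterGet (fun k => k * tN % P) (fun p => p * S' % P)
      (fun k => PySem.Int.toStr (1 + (k : Int) * ((G : Nat) : Int))) P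
      (fun k _ => Nat.mod_lt _ hPpos) (fun k hk => huniq k hk)
      P le_rfl p (p * S' % P) (Nat.mod_lt _ hPpos) (hfσ p hp)
    rw [hget, List.getElem?_map, List.getElem?_range hp]
    show some (PySem.Int.toStr (1 + ((p * S' % P : Nat) : Int) * ((G : Nat) : Int)))
      = some (PySem.Int.toStr (1 + ((p * S % N : Nat) : Int)))
    have harith : (1 : Int) + ((p * S' % P : Nat) : Int) * ((G : Nat) : Int)
        = 1 + ((p * S % N : Nat) : Int) := by
      have hNat : p * S % N = (p * S' % P) * G := by
        rw [hNfac, hSfac, ← mul_assoc, Nat.mul_mod_mul_right]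
      rw [hNat]
      push_cast
      ring
    rw [harith]
  · rw [List.getElem?_eq_none (by omega), List.getElem?_eq_none (by simp; omega)]

-- ===== VERDICT (by name: the statement is the Claim_ definition above) =====
theorem get_result_interval_spec : Claim_equal_get_result_interval := by
  intro n m _ hpre
  unfold Spec_get_result_interval get_result_interval
  have hn : 0 < n := hpre
  have hN : ((n.toNat : Nat) : Int) = n := Int.toNat_of_nonneg (by omega)
  have hNpos : 0 < n.toNat := by omega
  have hs0 : 0 ≤ PySem.Int.mod (m - 1) n := PySem.Int.mod_nonneg _ hn
  have hS : (((PySem.Int.mod (m - 1) n).toNat : Nat) : Int) = PySem.Int.mod (m - 1) n :=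
    Int.toNat_of_nonneg hs0
  set N := n.toNat with hNdef
  set S := (PySem.Int.mod (m - 1) n).toNat with hSdef
  have hgpos : 0 < Nat.gcd N S := Nat.gcd_pos_of_pos_left _ hNpos
  have hcntpos : 0 < N / Nat.gcd N S :=
    Nat.div_pos (Nat.le_of_dvd hNpos (Nat.gcd_dvd_left N S)) hgpos
  have hcntle : N / Nat.gcd N S ≤ N := Nat.div_le_self N _
  have hA : pvLoopA (PySem.List.pyRange 1 (n + 1) 1) n m N 0 []
      = (List.range (N / Nat.gcd N S)).map
          (fun i => PySem.Int.toStr (1 + ((i * S % N : Nat) : Int))) := by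
    have h0 : ((0 * S % N : Nat) : Int) = 0 := by simp
    have h := pvLoopA_spec n m N S hN hNpos hS N 0 [] (by omega) (by omega)
    rw [h0] at h
    rw [List.range_eq_range']
    simpa using h
  rw [hA, pvAltChar n m hn]
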